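-- pv_equiv track=rewrite | github.com/SugeilyCruz/Compiladores- | interprete.py | obtenerListaInfija
-- ===== SOURCE A (Python) =====
-- def obtenerListaInfija(cadena_infija):
--     if(type(cadena_infija) == list):
--         return obtenerListaInfija("".join(cadena_infija))
--     '''Devuelve una cadena en notaci칩n infija dividida por sus elementos.'''
--     infija = []
--     cad = ''
--     for i in cadena_infija:
--        if i in['+', '-', '*', '/', '(', ')', '^', '=']:
--            if cad != '':
--                infija.append(cad)
--                cad = ''
--            infija.append(i)
--        elif i == chr(32): # Si es un espacio.
--            cad = cad
--        else:
--            cad += i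
--     if cad != '':
--        infija.append(cad)
--     return infija
-- ===== SOURCE B (Python) =====
-- def obtenerListaInfija(cadena_infija):
--     if type(cadena_infija) == list:
--         return obtenerListaInfija("".join(cadena_infija))
--     ops = '+-*/()^='
--     s = cadena_infija.replace(' ', '')
--     tokens = []
--     i = 0
--     n = len(s)
--     while i < n:
--         if s[i] in ops:
--             tokens.append(s[i])
--             i += 1
--         else:
--             j = i
--             while j < n and s[j] not in ops:
--                 j += 1
--             tokens.append(s[i:j])
--             i = j
--     return tokens
-- ===== Notes on version B (the rewrite author's own statement) =====
-- stated objective: alternative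
-- what changed: Replaces the single-pass character-buffer accumulator with a two-phase scanner: strip spaces first, then emit tokens by jumping over maximal non-operator runs with index pointers and slicing them out (no per-character buffer concatenation).
import Mathlib
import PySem

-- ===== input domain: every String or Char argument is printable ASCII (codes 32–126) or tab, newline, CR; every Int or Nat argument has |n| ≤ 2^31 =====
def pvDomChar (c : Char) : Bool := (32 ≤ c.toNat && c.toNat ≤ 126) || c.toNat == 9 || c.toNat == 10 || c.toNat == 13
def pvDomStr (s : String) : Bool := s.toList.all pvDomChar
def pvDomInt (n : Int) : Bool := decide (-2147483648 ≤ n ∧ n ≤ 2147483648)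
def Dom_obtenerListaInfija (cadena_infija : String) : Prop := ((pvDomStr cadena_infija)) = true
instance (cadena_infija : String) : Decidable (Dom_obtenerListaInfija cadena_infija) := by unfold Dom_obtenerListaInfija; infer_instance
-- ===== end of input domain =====

-- B replaces A's single-pass buffer accumulator by a two-phase scan (strip spaces, then
-- cut at operator characters / maximal non-operator runs); same return value.
-- Under the type convention the argument is a String, so A's `type == list` branch is vacuous.

-- ===== PORT A =====
-- A's operator list
def pvOpsA : List Char := ['+', '-', '*', '/', '(', ')', '^', '=']

-- the `for` loop of A, state = (infija, cad); cad kept as List Char (appending a char at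
-- the end, exactly Python's `cad += i`); the final `if cad != ''` flush is the base case.
def pvALoop : List Char → List String → List Char → List String
  | [], infija, cad => if cad ≠ [] then infija ++ [String.mk cad] else infija
  | c :: cs, infija, cad =>
    if c ∈ pvOpsA then
      pvALoop cs ((if cad ≠ [] then infija ++ [String.mk cad] else infija) ++ [String.mk [c]]) []
    else if c = ' ' then
      pvALoop cs infija cad
    else
      pvALoop cs infija (cad ++ [c])

def obtenerListaInfija (cadena_infija : String) : List String :=
  pvALoop cadena_infija.toList [] []

-- ===== PORT B =====
def pvOpsB : List Char := ['+', '-', '*', '/', '(', ')', '^', '=']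

-- Source B's index scan: the inner `while j < n and s[j] not in ops` computes the maximal
-- non-operator run, i.e. takeWhile, and `s[i:j]` is that run; `i = j` is dropWhile.
def pvBTok : List Char → List String
  | [] => []
  | c :: cs =>
    if c ∈ pvOpsB then
      String.mk [c] :: pvBTok cs
    else
      String.mk (c :: cs.takeWhile (fun x => !(x ∈ pvOpsB))) ::
        pvBTok (cs.dropWhile (fun x => !(x ∈ pvOpsB)))
  termination_by cs => cs.length
  decreasing_by
    · simp
    · simpa using Nat.lt_succ_of_le (List.length_dropWhile_le _ _)

def obtenerListaInfija_alt (cadena_infija : String) : List String :=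
  -- s.replace(' ', '') : exact as removal of the space character
  pvBTok (cadena_infija.toList.filter (fun c => c ≠ ' '))

-- ===== PRECONDITION & SPEC =====
def Spec_obtenerListaInfija (cadena_infija : String) (out : List String) : Prop := out = obtenerListaInfija_alt cadena_infija
instance (cadena_infija : String) (out : List String) : Decidable (Spec_obtenerListaInfija cadena_infija out) := by unfold Spec_obtenerListaInfija; infer_instance

-- ===== CLAIM (what is proved, stated in full; the proofs are below) =====
def Claim_equal_obtenerListaInfija : Prop := ∀ (cadena_infija : String), Dom_obtenerListaInfija cadena_infija → Spec_obtenerListaInfija cadena_infija (obtenerListaInfija cadena_infija)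

-- ===== LEMMAS AND PROOFS =====

-- the accumulator infija is a prefix that passes through untouched
theorem pvALoop_acc (cs : List Char) : ∀ (infija : List String) (cad : List Char),
    pvALoop cs infija cad = infija ++ pvALoop cs [] cad := by
  induction cs with
  | nil => intro infija cad; simp only [pvALoop]; split <;> simp
  | cons c cs ih =>
    intro infija cad
    simp only [pvALoop]
    by_cases h1 : c ∈ pvOpsA
    · rw [if_pos h1, if_pos h1]
      have e1 := ih ((if cad ≠ [] then infija ++ [String.mk cad] else infija) ++ [String.mk [c]]) []
      have e2 := ih ((if cad ≠ [] then ([] : List String) ++ [String.mk cad] else []) ++ [String.mk [c]]) []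
      rw [e1, e2]
      by_cases h2 : cad = [] <;> simp [h2]
    · rw [if_neg h1, if_neg h1]
      by_cases h2 : c = ' '
      · rw [if_pos h2, if_pos h2]; exact ih _ _
      · rw [if_neg h2, if_neg h2]; exact ih _ _

-- skipping spaces inline = filtering them out first (' ' is not an operator)
theorem pvALoop_filter (cs : List Char) : ∀ (cad : List Char),
    pvALoop cs [] cad = pvALoop (cs.filter (fun c => c ≠ ' ')) [] cad := by
  induction cs with
  | nil => intro cad; simp
  | cons c cs ih =>
    intro cad
    by_cases hsp : c = ' '
    · subst hsp
      rw [List.filter_cons_of_neg (by simp)]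
      have hop : ¬ (' ' ∈ pvOpsA) := by decide
      simp only [pvALoop, if_neg hop]
      exact ih cad
    · rw [List.filter_cons_of_pos (by simp [hsp])]
      simp only [pvALoop]
      by_cases h1 : c ∈ pvOpsA
      · rw [if_pos h1, if_pos h1]
        have e1 := pvALoop_acc cs
          ((if cad ≠ [] then ([] : List String) ++ [String.mk cad] else []) ++ [String.mk [c]]) []
        have e2 := pvALoop_acc (cs.filter (fun c => decide (c ≠ ' ')))
          ((if cad ≠ [] then ([] : List String) ++ [String.mk cad] else []) ++ [String.mk [c]]) []
        rw [e1, e2, ih []]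
      · rw [if_neg h1, if_neg h1, if_neg hsp, if_neg hsp]
        exact ih _

-- on a space-free list, A's buffer loop computes B's run scanner; the pending buffer cad
-- merges with the leading non-operator run
theorem pvALoop_eq_bTok (cs : List Char) (h : ∀ c ∈ cs, c ≠ ' ') : ∀ (cad : List Char),
    pvALoop cs [] cad =
      if cad = [] then pvBTok cs
      else String.mk (cad ++ cs.takeWhile (fun x => !(x ∈ pvOpsB))) ::
             pvBTok (cs.dropWhile (fun x => !(x ∈ pvOpsB))) := by
  induction cs with
  | nil =>
    intro cad
    by_cases hcad : cad = [] <;> simp [pvALoop, pvBTok, hcad]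
  | cons c cs ih =>
    intro cad
    have hc : c ≠ ' ' := h c (List.mem_cons_self ..)
    have hcs : ∀ x ∈ cs, x ≠ ' ' := fun x hx => h x (List.mem_cons_of_mem _ hx)
    by_cases hop : c ∈ pvOpsA
    · have hopB : c ∈ pvOpsB := hop
      simp only [pvALoop, if_pos hop]
      rw [pvALoop_acc, ih hcs [], if_pos rfl]
      have ht : List.takeWhile (fun x => !decide (x ∈ pvOpsB)) (c :: cs) = [] := by
        simp [hopB]
      have hd : List.dropWhile (fun x => !decide (x ∈ pvOpsB)) (c :: cs) = c :: cs := by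
        simp [hopB]
      have hb : pvBTok (c :: cs) = String.mk [c] :: pvBTok cs := by
        simp only [pvBTok, if_pos hopB]
      by_cases hcad : cad = []
      · subst hcad; simp [hb]
      · simp only [if_neg hcad, ht, hd, hb]
        simp [hcad]
    · have hopB : ¬ (c ∈ pvOpsB) := hop
      simp only [pvALoop, if_neg hop, if_neg hc]
      rw [ih hcs (cad ++ [c]), if_neg (by simp : ¬ (cad ++ [c] = []))]
      have ht : List.takeWhile (fun x => !decide (x ∈ pvOpsB)) (c :: cs)
          = c :: List.takeWhile (fun x => !decide (x ∈ pvOpsB)) cs := by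
        simp [hopB]
      have hd : List.dropWhile (fun x => !decide (x ∈ pvOpsB)) (c :: cs)
          = List.dropWhile (fun x => !decide (x ∈ pvOpsB)) cs := by
        simp [hopB]
      by_cases hcad : cad = []
      · subst hcad
        rw [if_pos rfl]
        have hb : pvBTok (c :: cs)
            = String.mk (c :: List.takeWhile (fun x => !decide (x ∈ pvOpsB)) cs) ::
                pvBTok (List.dropWhile (fun x => !decide (x ∈ pvOpsB)) cs) := by
          simp only [pvBTok, if_neg hopB]
        rw [hb]; simp
      · rw [if_neg hcad, ht, hd]; simp

-- ===== VERDICT (by name: the statement is the Claim_ definition above) =====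
theorem obtenerListaInfija_spec : Claim_equal_obtenerListaInfija := by
  intro s _
  unfold Spec_obtenerListaInfija obtenerListaInfija obtenerListaInfija_alt
  rw [pvALoop_filter]
  rw [pvALoop_eq_bTok _ (by intro c hc; simp [List.mem_filter] at hc; exact hc.2) []]
  simp
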